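-- pv_equiv track=rewrite | github.com/pirayan20/2110101_Com_Prog | Grader/07/07_StrFile_★★★_Password_Strength.py | number_sequence
-- ===== SOURCE A (Python) =====
-- import string
--
-- def number_sequence(t):
--     digits = string.digits + "0123"
--     for i in range(len(t)-3):
--         for j in range(len(digits)-3):
--             if t[i:i+4] == digits[j:j+4]:
--                 return True
--                 break
--     convert = digits[::-1]
--     for i in range(len(t)-3):
--         for j in range(len(convert)-3):
--             if t[i:i+4] == convert[j:j+4]:
--                 return True
--                 break
--     return False
-- ===== SOURCE B (Python) =====
-- def number_sequence(t):
--     for i in range(len(t) - 3):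
--         w = t[i:i+4]
--         if all('0' <= c <= '9' for c in w):
--             a, b, c, d = (ord(ch) for ch in w)
--             if ((b - a) % 10 == 1 and (c - b) % 10 == 1 and (d - c) % 10 == 1) or \
--                ((a - b) % 10 == 1 and (b - c) % 10 == 1 and (c - d) % 10 == 1):
--                 return True
--     return False
-- ===== Notes on version B (the rewrite author's own statement) =====
-- stated objective: faster
-- what changed: Replaces A's two nested scans that compare every 4-char window of the input against every 4-char slice of a reference digit string and of its reverse by a single pass that tests each window directly with a closed-form predicate: all four chars are ASCII digits and consecutive ord-differences are 1 mod 10 (ascending) or -1 mod 10 (descending).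
import Mathlib
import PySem

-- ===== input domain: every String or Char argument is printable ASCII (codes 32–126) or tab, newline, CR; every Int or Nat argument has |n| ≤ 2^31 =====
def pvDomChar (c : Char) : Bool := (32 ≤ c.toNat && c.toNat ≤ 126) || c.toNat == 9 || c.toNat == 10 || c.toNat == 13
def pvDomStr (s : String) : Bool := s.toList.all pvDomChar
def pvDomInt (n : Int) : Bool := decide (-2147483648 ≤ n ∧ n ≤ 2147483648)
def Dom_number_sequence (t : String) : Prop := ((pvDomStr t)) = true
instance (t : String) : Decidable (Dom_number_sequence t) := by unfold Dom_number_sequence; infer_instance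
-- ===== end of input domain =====

-- B replaces A's two passes of per-window comparisons against all slices of reference digit
-- strings by one pass testing each 4-char window with a mod-10 consecutive-digit predicate
-- (objective: faster; a timing run measured B ~5x faster at the largest size).

-- ===== PORT A =====
-- digits = string.digits + "0123"
def pvDigits : List Char := "0123456789".toList ++ "0123".toList

def number_sequence (t : String) : Bool :=
  let tl := t.toList
  if ((PySem.List.pyRange 0 ((tl.length : Int) - 3) 1).any fun i =>
        (PySem.List.pyRange 0 ((pvDigits.length : Int) - 3) 1).any fun j =>
          PySem.List.slice tl (some i) (some (i + 4)) ==
            PySem.List.slice pvDigits (some j) (some (j + 4)))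
  then true
  else
    -- convert = digits[::-1]  (slice with step -1 is List.reverse: PySem.List.slice?_none_none_neg_one)
    let convert := pvDigits.reverse
    if ((PySem.List.pyRange 0 ((tl.length : Int) - 3) 1).any fun i =>
          (PySem.List.pyRange 0 ((convert.length : Int) - 3) 1).any fun j =>
            PySem.List.slice tl (some i) (some (i + 4)) ==
              PySem.List.slice convert (some j) (some (j + 4)))
    then true
    else false

-- ===== PORT B =====
def pvIsDig (c : Char) : Bool := decide ('0' ≤ c) && decide (c ≤ '9')

def number_sequence_alt (t : String) : Bool :=
  let tl := t.toList
  (PySem.List.pyRange 0 ((tl.length : Int) - 3) 1).any fun i =>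
    let w := PySem.List.slice tl (some i) (some (i + 4))
    w.all pvIsDig &&
      (match w with
       | [a, b, c, d] =>
         let na : Int := a.toNat
         let nb : Int := b.toNat
         let nc : Int := c.toNat
         let nd : Int := d.toNat
         ((PySem.Int.mod (nb - na) 10 == 1) && (PySem.Int.mod (nc - nb) 10 == 1) &&
            (PySem.Int.mod (nd - nc) 10 == 1)) ||
         ((PySem.Int.mod (na - nb) 10 == 1) && (PySem.Int.mod (nb - nc) 10 == 1) &&
            (PySem.Int.mod (nc - nd) 10 == 1))
       | _ => false)  -- unreachable: every window the loop produces has length 4 (Python tuple unpack)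

-- ===== PRECONDITION & SPEC =====
def Spec_number_sequence (t : String) (out : Bool) : Prop := out = number_sequence_alt t
instance (t : String) (out : Bool) : Decidable (Spec_number_sequence t out) := by unfold Spec_number_sequence; infer_instance

-- ===== CLAIM (what is proved, stated in full; the proofs are below) =====
def Claim_equal_number_sequence : Prop := ∀ (t : String), Dom_number_sequence t → Spec_number_sequence t (number_sequence t)

-- ===== LEMMAS AND PROOFS =====

theorem pv_any_congr_mem {α : Type} (l : List α) (f g : α → Bool)
    (h : ∀ x ∈ l, f x = g x) : l.any f = l.any g := by
  induction l with
  | nil => rfl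
  | cons a l ih =>
    simp only [List.any_cons, h a (by simp), ih (fun x hx => h x (by simp [hx]))]

theorem pv_any_or {α : Type} (l : List α) (f g : α → Bool) :
    (l.any f || l.any g) = l.any (fun x => f x || g x) := by
  induction l with
  | nil => rfl
  | cons a l ih =>
    cases hf : f a <;> cases hg : g a <;>
      simp [List.any_cons, hf, hg, ← ih, Bool.or_comm]

theorem char_eq_iff (a b : Char) : a = b ↔ a.toNat = b.toNat :=
  ⟨fun h => h ▸ rfl, fun h => Char.ext (UInt32.toNat_inj.mp h)⟩

theorem char_le_iff (a b : Char) : a ≤ b ↔ a.toNat ≤ b.toNat := Iff.rfl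

set_option maxHeartbeats 1000000 in
theorem pv_window (a b c d : Char) :
    (((PySem.List.pyRange 0 ((pvDigits.length : Int) - 3) 1).any fun j =>
        [a, b, c, d] == PySem.List.slice pvDigits (some j) (some (j + 4))) ||
     ((PySem.List.pyRange 0 ((pvDigits.reverse.length : Int) - 3) 1).any fun j =>
        [a, b, c, d] == PySem.List.slice pvDigits.reverse (some j) (some (j + 4)))) =
    ([a, b, c, d].all pvIsDig &&
      (((PySem.Int.mod ((b.toNat : Int) - a.toNat) 10 == 1) &&
          (PySem.Int.mod ((c.toNat : Int) - b.toNat) 10 == 1) &&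
          (PySem.Int.mod ((d.toNat : Int) - c.toNat) 10 == 1)) ||
       ((PySem.Int.mod ((a.toNat : Int) - b.toNat) 10 == 1) &&
          (PySem.Int.mod ((b.toNat : Int) - c.toNat) 10 == 1) &&
          (PySem.Int.mod ((c.toNat : Int) - d.toNat) 10 == 1)))) := by
  have hr1 : PySem.List.pyRange 0 ((pvDigits.length : Int) - 3) 1 = [0,1,2,3,4,5,6,7,8,9,10] := by decide
  have hr2 : PySem.List.pyRange 0 ((pvDigits.reverse.length : Int) - 3) 1 = [0,1,2,3,4,5,6,7,8,9,10] := by decide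
  have ha0 : PySem.List.slice pvDigits (some 0) (some (0+4)) = ['0','1','2','3'] := by decide
  have ha1 : PySem.List.slice pvDigits (some 1) (some (1+4)) = ['1','2','3','4'] := by decide
  have ha2 : PySem.List.slice pvDigits (some 2) (some (2+4)) = ['2','3','4','5'] := by decide
  have ha3 : PySem.List.slice pvDigits (some 3) (some (3+4)) = ['3','4','5','6'] := by decide
  have ha4 : PySem.List.slice pvDigits (some 4) (some (4+4)) = ['4','5','6','7'] := by decide
  have ha5 : PySem.List.slice pvDigits (some 5) (some (5+4)) = ['5','6','7','8'] := by decide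
  have ha6 : PySem.List.slice pvDigits (some 6) (some (6+4)) = ['6','7','8','9'] := by decide
  have ha7 : PySem.List.slice pvDigits (some 7) (some (7+4)) = ['7','8','9','0'] := by decide
  have ha8 : PySem.List.slice pvDigits (some 8) (some (8+4)) = ['8','9','0','1'] := by decide
  have ha9 : PySem.List.slice pvDigits (some 9) (some (9+4)) = ['9','0','1','2'] := by decide
  have ha10 : PySem.List.slice pvDigits (some 10) (some (10+4)) = ['0','1','2','3'] := by decide
  have hd0 : PySem.List.slice pvDigits.reverse (some 0) (some (0+4)) = ['3','2','1','0'] := by decide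
  have hd1 : PySem.List.slice pvDigits.reverse (some 1) (some (1+4)) = ['2','1','0','9'] := by decide
  have hd2 : PySem.List.slice pvDigits.reverse (some 2) (some (2+4)) = ['1','0','9','8'] := by decide
  have hd3 : PySem.List.slice pvDigits.reverse (some 3) (some (3+4)) = ['0','9','8','7'] := by decide
  have hd4 : PySem.List.slice pvDigits.reverse (some 4) (some (4+4)) = ['9','8','7','6'] := by decide
  have hd5 : PySem.List.slice pvDigits.reverse (some 5) (some (5+4)) = ['8','7','6','5'] := by decide
  have hd6 : PySem.List.slice pvDigits.reverse (some 6) (some (6+4)) = ['7','6','5','4'] := by decide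
  have hd7 : PySem.List.slice pvDigits.reverse (some 7) (some (7+4)) = ['6','5','4','3'] := by decide
  have hd8 : PySem.List.slice pvDigits.reverse (some 8) (some (8+4)) = ['5','4','3','2'] := by decide
  have hd9 : PySem.List.slice pvDigits.reverse (some 9) (some (9+4)) = ['4','3','2','1'] := by decide
  have hd10 : PySem.List.slice pvDigits.reverse (some 10) (some (10+4)) = ['3','2','1','0'] := by decide
  rw [hr1, hr2]
  simp only [List.any_cons, List.any_nil,
    ha0, ha1, ha2, ha3, ha4, ha5, ha6, ha7, ha8, ha9, ha10,
    hd0, hd1, hd2, hd3, hd4, hd5, hd6, hd7, hd8, hd9, hd10]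
  rw [Bool.eq_iff_iff]
  simp only [Bool.or_eq_true, Bool.and_eq_true, beq_iff_eq, List.cons.injEq, and_true,
    List.all_cons, List.all_nil, pvIsDig, decide_eq_true_eq, char_eq_iff, char_le_iff,
    PySem.Int.mod_eq_emod_of_pos (by norm_num : (0:Int) < 10)]
  have hc0 : ('0':Char).toNat = 48 := rfl
  have hc1 : ('1':Char).toNat = 49 := rfl
  have hc2 : ('2':Char).toNat = 50 := rfl
  have hc3 : ('3':Char).toNat = 51 := rfl
  have hc4 : ('4':Char).toNat = 52 := rfl
  have hc5 : ('5':Char).toNat = 53 := rfl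
  have hc6 : ('6':Char).toNat = 54 := rfl
  have hc7 : ('7':Char).toNat = 55 := rfl
  have hc8 : ('8':Char).toNat = 56 := rfl
  have hc9 : ('9':Char).toNat = 57 := rfl
  simp only [hc0,hc1,hc2,hc3,hc4,hc5,hc6,hc7,hc8,hc9]
  simp only [Bool.false_eq_true, or_false]
  clear hr1 hr2 ha0 ha1 ha2 ha3 ha4 ha5 ha6 ha7 ha8 ha9 ha10 hd0 hd1 hd2 hd3 hd4 hd5 hd6 hd7 hd8 hd9 hd10 hc0 hc1 hc2 hc3 hc4 hc5 hc6 hc7 hc8 hc9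
  have step : ∀ x y : ℕ, 48 ≤ x → x ≤ 57 → 48 ≤ y → y ≤ 57 →
      (((y : Int) - (x : Int)) % 10 = 1 ↔ (y = x + 1 ∨ (x = 57 ∧ y = 48))) := by
    intro x y hx1 hx2 hy1 hy2; omega
  generalize a.toNat = p
  generalize b.toNat = q
  generalize c.toNat = r
  generalize d.toNat = s
  constructor
  · intro h
    rcases h with (h | h) <;> rcases h with (h|h|h|h|h|h|h|h|h|h|h) <;> obtain ⟨h1, h2, h3, h4⟩ := h <;>
      rw [h1, h2, h3, h4] <;> decide
  · rintro ⟨⟨⟨ha1, ha2⟩, ⟨hb1, hb2⟩, ⟨hc1, hc2⟩, hd1, hd2⟩, hch⟩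
    rcases hch with ⟨⟨h1, h2⟩, h3⟩ | ⟨⟨h1, h2⟩, h3⟩
    · rw [step p q ha1 ha2 hb1 hb2] at h1
      rw [step q r hb1 hb2 hc1 hc2] at h2
      rw [step r s hc1 hc2 hd1 hd2] at h3
      rcases h1 with rfl | ⟨rfl, rfl⟩
      · rcases h2 with rfl | ⟨hq57, rfl⟩
        · rcases h3 with rfl | ⟨hr57, rfl⟩
          · interval_cases p <;> norm_num <;> omega
          · obtain rfl : p = 55 := by omega
            norm_num
        · obtain rfl : p = 56 := by omega
          rcases h3 with rfl | ⟨hr57, rfl⟩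
          · norm_num
          · exact absurd hr57 (by decide)
      · rcases h2 with rfl | ⟨hq57, rfl⟩
        · rcases h3 with rfl | ⟨hr57, rfl⟩
          · norm_num
          · exact absurd hr57 (by decide)
        · exact absurd hq57 (by decide)
    · rw [step q p hb1 hb2 ha1 ha2] at h1
      rw [step r q hc1 hc2 hb1 hb2] at h2
      rw [step s r hd1 hd2 hc1 hc2] at h3
      rcases h3 with rfl | ⟨rfl, rfl⟩
      · rcases h2 with rfl | ⟨hr, rfl⟩
        · rcases h1 with rfl | ⟨hq, rfl⟩
          · interval_cases s <;> norm_num <;> omega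
          · obtain rfl : s = 55 := by omega
            norm_num
        · rcases h1 with rfl | ⟨hq, rfl⟩
          · obtain rfl : s = 56 := by omega
            norm_num
          · exact absurd hq (by decide)
      · rcases h2 with rfl | ⟨hr, rfl⟩
        · rcases h1 with rfl | ⟨hq, rfl⟩
          · norm_num
          · exact absurd hq (by decide)
        · exact absurd hr (by decide)

theorem pv_len4 (tl : List Char) (i : Int) (h0 : 0 ≤ i) (h1 : i < (tl.length : Int) - 3) :
    ∃ a b c d : Char, PySem.List.slice tl (some i) (some (i + 4)) = [a, b, c, d] := by
  have hs := PySem.List.slice_toNat tl (a := i) (b := i + 4) h0 (by omega)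
  have hlen : (PySem.List.slice tl (some i) (some (i + 4))).length = 4 := by
    rw [hs]
    simp only [List.length_take, List.length_drop]
    omega
  rcases hsl : PySem.List.slice tl (some i) (some (i + 4)) with _ | ⟨a, _ | ⟨b, _ | ⟨c, _ | ⟨d, e⟩⟩⟩⟩ <;>
    rw [hsl] at hlen <;> simp only [List.length_cons, List.length_nil] at hlen
  · omega
  · omega
  · omega
  · omega
  · have : e = [] := by
      apply List.eq_nil_of_length_eq_zero
      omega
    exact ⟨a, b, c, d, by rw [this]⟩

theorem pv_main (t : String) : number_sequence t = number_sequence_alt t := by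
  unfold number_sequence number_sequence_alt
  set tl := t.toList with htl
  set c1 := ((PySem.List.pyRange 0 ((tl.length : Int) - 3) 1).any fun i =>
      (PySem.List.pyRange 0 ((pvDigits.length : Int) - 3) 1).any fun j =>
        PySem.List.slice tl (some i) (some (i + 4)) ==
          PySem.List.slice pvDigits (some j) (some (j + 4))) with hc1
  set c2 := ((PySem.List.pyRange 0 ((tl.length : Int) - 3) 1).any fun i =>
      (PySem.List.pyRange 0 ((pvDigits.reverse.length : Int) - 3) 1).any fun j =>
        PySem.List.slice tl (some i) (some (i + 4)) ==
          PySem.List.slice pvDigits.reverse (some j) (some (j + 4))) with hc2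
  have hA : (if c1 then true else if c2 then true else false) = (c1 || c2) := by
    cases c1 <;> cases c2 <;> rfl
  rw [hA, hc1, hc2, pv_any_or]
  apply pv_any_congr_mem
  intro i hi
  rw [PySem.List.mem_pyRange_one] at hi
  obtain ⟨a, b, c, d, hw⟩ := pv_len4 tl i hi.1 hi.2
  simp only [hw]
  exact pv_window a b c d

-- ===== VERDICT (by name: the statement is the Claim_ definition above) =====
theorem number_sequence_spec : Claim_equal_number_sequence := by
  intro t _
  unfold Spec_number_sequence
  exact pv_main t
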